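-- pv_equiv track=rewrite | github.com/Murillo/Hackerrank-Problem-Solving | Algorithms/Implementation/grading.py | solve
-- ===== SOURCE A (Python) =====
-- def next_multiple(number):
--     max_multiple = True
--     start = 1
--     while (max_multiple):
--         if (start * 5) > number:
--             max_multiple = False
--         else:
--             start += 1
--     return start
--
-- def solve(grades):
--     new_grades = []
--     for i in range(len(grades)):
--         if grades[i] >= 38:
--             new_value = (next_multiple(grades[i]) * 5) - grades[i]
--             if new_value < 3:
--                 new_grades.append(grades[i] + new_value)
--                 continue
--         new_grades.append(grades[i])
--     return new_grades
-- ===== SOURCE B (Python) =====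
-- def solve(grades):
--     return [g + 5 - g % 5 if g >= 38 and g % 5 >= 3 else g for g in grades]
-- ===== Notes on version B (the rewrite author's own statement) =====
-- stated objective: simpler
-- what changed: Dropped the next_multiple counting-loop helper and the index-based for/continue loop; B is a one-line comprehension using the closed form g % 5 (round up when the remainder is at least 3).
import Mathlib
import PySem

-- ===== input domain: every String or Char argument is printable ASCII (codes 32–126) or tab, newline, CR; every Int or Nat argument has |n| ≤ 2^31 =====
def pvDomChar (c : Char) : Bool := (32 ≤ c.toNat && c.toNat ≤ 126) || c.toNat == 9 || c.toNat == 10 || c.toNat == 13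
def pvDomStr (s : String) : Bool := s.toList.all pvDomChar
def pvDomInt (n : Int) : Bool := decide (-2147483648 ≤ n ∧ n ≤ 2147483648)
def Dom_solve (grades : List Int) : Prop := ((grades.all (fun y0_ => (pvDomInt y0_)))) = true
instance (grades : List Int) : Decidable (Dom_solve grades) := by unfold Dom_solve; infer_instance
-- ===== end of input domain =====

-- B replaces A's counting search for the next multiple of 5 by the closed form g % 5,
-- turning the indexed loop with continue into a single map (objective: simpler).


-- ===== PORT A =====
-- A's while loop: counts start upward from 1 until start*5 > number.
def nmLoop (number : Int) (start : Int) : Int :=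
  if start * 5 > number then start else nmLoop number (start + 1)
termination_by (number + 5 - start * 5).toNat
decreasing_by omega

def next_multiple (number : Int) : Int := nmLoop number 1

def solve (grades : List Int) : List Int :=
  match grades with
  | [] => []
  | g :: t =>
    if g ≥ 38 then
      let new_value := next_multiple g * 5 - g
      if new_value < 3 then (g + new_value) :: solve t
      else g :: solve t
    else g :: solve t

-- ===== PORT B =====
def solve_alt (grades : List Int) : List Int :=
  grades.map (fun g =>
    if g ≥ 38 ∧ PySem.Int.mod g 5 ≥ 3 then g + 5 - PySem.Int.mod g 5 else g)

-- ===== PRECONDITION & SPEC =====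
def Spec_solve (grades : List Int) (out : List Int) : Prop := out = solve_alt grades
instance (grades : List Int) (out : List Int) : Decidable (Spec_solve grades out) := by unfold Spec_solve; infer_instance

-- ===== CLAIM (what is proved, stated in full; the proofs are below) =====
def Claim_equal_solve : Prop := ∀ (grades : List Int), Dom_solve grades → Spec_solve grades (solve grades)

-- ===== LEMMAS AND PROOFS =====

-- nmLoop number start is the least s ≥ start with 5*s > number: its bracketing properties.
theorem nmLoop_bounds (number start : Int) (h : (start - 1) * 5 ≤ number) :
    nmLoop number start * 5 > number ∧ (nmLoop number start - 1) * 5 ≤ number := by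
  unfold nmLoop
  split
  · exact ⟨by assumption, h⟩
  · exact nmLoop_bounds number (start + 1) (by omega)
termination_by (number + 5 - start * 5).toNat
decreasing_by omega

-- A's rounding gap equals the modular closed form for grades ≥ 38.
theorem next_multiple_gap (g : Int) (hg : 38 ≤ g) :
    next_multiple g * 5 - g = 5 - PySem.Int.mod g 5 := by
  have h := nmLoop_bounds g 1 (by omega)
  have hm : PySem.Int.mod g 5 = g % 5 := PySem.Int.mod_eq_emod_of_pos (by omega)
  unfold next_multiple
  omega

theorem solve_eq_alt (grades : List Int) : solve grades = solve_alt grades := by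
  induction grades with
  | nil => rfl
  | cons g t ih =>
    simp only [solve, solve_alt, List.map] at *
    by_cases hg : g ≥ 38
    · have hm : PySem.Int.mod g 5 = g % 5 := PySem.Int.mod_eq_emod_of_pos (by omega)
      have hk := next_multiple_gap g hg
      rw [if_pos hg]
      by_cases h5 : (3:Int) ≤ g % 5
      · rw [if_pos (show next_multiple g * 5 - g < 3 by omega),
            if_pos (show g ≥ 38 ∧ PySem.Int.mod g 5 ≥ 3 from ⟨hg, by omega⟩)]
        exact congrArg₂ _ (by omega) ih
      · rw [if_neg (show ¬ next_multiple g * 5 - g < 3 by omega),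
            if_neg (show ¬ (g ≥ 38 ∧ PySem.Int.mod g 5 ≥ 3) by omega)]
        exact congrArg _ ih
    · rw [if_neg hg, if_neg (by omega : ¬ (g ≥ 38 ∧ PySem.Int.mod g 5 ≥ 3))]
      exact congrArg _ ih

-- ===== VERDICT (by name: the statement is the Claim_ definition above) =====
theorem solve_spec : Claim_equal_solve := by
  intro grades _
  exact solve_eq_alt grades
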